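-- pv_equiv track=rewrite | github.com/hddhdd96/BjAndProgram | 프로그래머스/unrated/135808. 과일 장수/과일 장수.py | solution
-- ===== SOURCE A (Python) =====
-- def solution(k, m, score):
--     answer = 0
--     score.sort(reverse=True)
--     for i in range(len(score)):
--         if len(score[i*m:i*m+m]) == m:
--             answer += min(score[i*m:i*m+m])*m
--     t = 1
--     return answer
-- ===== SOURCE B (Python) =====
-- def solution(k, m, score):
--     score.sort(reverse=True)
--     return m * sum(score[i] for i in range(m - 1, len(score), m))
-- ===== Notes on version B (the rewrite author's own statement) =====
-- stated objective: simpler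
-- what changed: Instead of scanning all len(score) start positions, slicing out each group and calling min() on it, B sums directly the group-minimum positions m-1, 2m-1, ... of the descending sort via a single strided range, with no slices, no min() calls and no length-check branch.
-- outside the precondition, e.g. on solution(0, 0, []): A returns 0, B raises ValueError
import Mathlib
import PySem

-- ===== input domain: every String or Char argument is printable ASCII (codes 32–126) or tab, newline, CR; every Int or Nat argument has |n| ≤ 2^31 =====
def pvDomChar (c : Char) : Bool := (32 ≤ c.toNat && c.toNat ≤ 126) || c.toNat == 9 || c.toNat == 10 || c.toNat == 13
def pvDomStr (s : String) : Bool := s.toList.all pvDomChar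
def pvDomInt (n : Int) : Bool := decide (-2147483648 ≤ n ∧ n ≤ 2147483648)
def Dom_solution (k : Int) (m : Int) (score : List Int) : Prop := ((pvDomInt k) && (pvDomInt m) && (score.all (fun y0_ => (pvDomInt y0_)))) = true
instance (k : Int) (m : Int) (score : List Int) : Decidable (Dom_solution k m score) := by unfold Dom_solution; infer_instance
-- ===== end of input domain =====

-- B replaces A's scan of every start position with slices and min() calls by a single
-- strided sum over the group-minimum positions of the descending sort (simpler; same
-- in-place sort mutation of `score` as A; equivalence is about the return value).


-- ===== PORT A =====
-- literal port of A: sort descending, then for i in range(len(score)) add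
-- min(score[i*m:i*m+m])*m whenever that slice has length m (the dead `t = 1` is dropped).
def solution (k : Int) (m : Int) (score : List Int) : Int :=
  let s := PySem.List.sorted score (fun x => x) true
  (PySem.List.pyRange 0 (PySem.List.len s) 1).foldl
    (fun answer i =>
      if PySem.List.len (PySem.List.slice s (some (i*m)) (some (i*m+m))) == m then
        answer + ((PySem.List.min? (PySem.List.slice s (some (i*m)) (some (i*m+m))) (fun x => x)).getD 0) * m
      else answer) 0

-- ===== PORT B =====
-- literal port of B: sort descending, then m * sum(score[i] for i in range(m-1, len(score), m)).
def solution_alt (k : Int) (m : Int) (score : List Int) : Int :=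
  let s := PySem.List.sorted score (fun x => x) true
  m * (PySem.List.pyRange (m - 1) (PySem.List.len s) m).foldl
        (fun acc i => acc + PySem.List.pyGetD s i 0) 0

-- ===== PRECONDITION & SPEC =====
-- Pre_ excludes exactly m = 0: there A raises ValueError via min([]) on any nonempty
-- score, and B raises ValueError (range step 0) always — including on score = [],
-- where A happens to return 0 because its loop body never runs (cited in claim.json).
def Pre_solution (k : Int) (m : Int) (score : List Int) : Prop := m ≠ 0
instance (k : Int) (m : Int) (score : List Int) : Decidable (Pre_solution k m score) := by unfold Pre_solution; infer_instance
def pvWitness_solution : Int × Int × List Int := (0, 2, [4, 1, 3, 2, 5])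

def Spec_solution (k : Int) (m : Int) (score : List Int) (out : Int) : Prop := out = solution_alt k m score
instance (k : Int) (m : Int) (score : List Int) (out : Int) : Decidable (Spec_solution k m score out) := by unfold Spec_solution; infer_instance

-- ===== CLAIM (what is proved, stated in full; the proofs are below) =====
def Claim_equal_solution : Prop := ∀ (k : Int) (m : Int) (score : List Int), Dom_solution k m score → Pre_solution k m score → Spec_solution k m score (solution k m score)

-- ===== LEMMAS AND PROOFS =====

-- a list that is pairwise descending has its last element as a minimum
theorem pv_getLast_le (l : List Int) (hp : l.Pairwise (fun a b => b ≤ a)) :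
    ∀ (h : l ≠ []) (y : Int), y ∈ l → l.getLast h ≤ y := by
  induction l with
  | nil => intro h; cases h rfl
  | cons a t ih =>
    intro h y hy
    rcases List.pairwise_cons.mp hp with ⟨ha, hpt⟩
    cases t with
    | nil => simp at hy; simp [hy]
    | cons b t' =>
      have hne : (b :: t') ≠ [] := by simp
      rw [List.getLast_cons hne]
      rcases List.mem_cons.mp hy with rfl | hy'
      · exact ha _ (List.getLast_mem hne)
      · exact ih hpt hne y hy'

-- min of a nonempty pairwise-descending list is its last element
theorem pv_min_desc (l : List Int) (h : l ≠ []) (hp : l.Pairwise (fun a b => b ≤ a)) :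
    (PySem.List.min? l (fun x => x)).getD 0 = l.getLast h := by
  cases l with
  | nil => cases h rfl
  | cons x t =>
    have hv : PySem.List.min? (x :: t) (fun y => y) = some (t.foldl min x) :=
      PySem.List.min?_id_cons x t
    have h1 : t.foldl min x ≤ (x :: t).getLast h :=
      PySem.List.min?_isMin hv _ (List.getLast_mem h)
    have h2 : (x :: t).getLast h ≤ t.foldl min x :=
      pv_getLast_le _ hp h _ (PySem.List.min?_mem hv)
    simpa [hv] using le_antisymm h1 h2

-- fold with a body that never fires is constant
theorem pv_foldl_id {α : Type} (l : List α) (a : Int) :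
    l.foldl (fun acc (_ : α) => acc) a = a := by
  induction l generalizing a with
  | nil => rfl
  | cons x t ih => simpa using ih a

-- sum of a truncated if-sum over range n equals the sum over range c
theorem pv_sum_ite (f : Nat → Int) (c n : Nat) (hcn : c ≤ n) :
    ((List.range n).map (fun k => if k < c then f k else 0)).sum
      = ((List.range c).map f).sum := by
  obtain ⟨d, rfl⟩ := Nat.exists_eq_add_of_le hcn
  rw [List.range_add, List.map_append, List.sum_append, List.map_map]
  have h1 : (List.range c).map (fun k => if k < c then f k else 0) = (List.range c).map f :=
    List.map_congr_left (fun k hk => by rw [if_pos (List.mem_range.mp hk)])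
  have h2 : ((List.range d).map ((fun k => if k < c then f k else 0) ∘ (fun x => c + x))).sum = 0 := by
    apply List.sum_eq_zero
    intro x hx
    rcases List.mem_map.mp hx with ⟨j, _, rfl⟩
    simp only [Function.comp]
    rw [if_neg (by omega)]
  rw [h1, h2, add_zero]

-- one term of A's loop equals the corresponding strided term of B
theorem pv_termA (s : List Int) (hp : s.Pairwise (fun a b => b ≤ a)) (mn : Nat) (hmn : 0 < mn)
    (c : Nat) (hck : ∀ j : Nat, j < c ↔ j * mn + mn ≤ s.length) (k : Nat) :
    (if PySem.List.len (PySem.List.slice s (some ((k : Int) * (mn : Int))) (some ((k : Int) * (mn : Int) + (mn : Int)))) == (mn : Int) then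
       ((PySem.List.min? (PySem.List.slice s (some ((k : Int) * (mn : Int))) (some ((k : Int) * (mn : Int) + (mn : Int)))) (fun x => x)).getD 0) * (mn : Int)
     else 0)
    = (if k < c then PySem.List.pyGetD s (((mn : Int) - 1) + (mn : Int) * (k : Int)) 0 * (mn : Int) else 0) := by
  have hcast1 : ((k : Int) * (mn : Int)) = ((k * mn : Nat) : Int) := by push_cast; ring
  have hcast2 : ((k : Int) * (mn : Int) + (mn : Int)) = ((k * mn + mn : Nat) : Int) := by push_cast; ring
  rw [hcast2, hcast1, PySem.List.slice_natCast]
  have hdrop : k * mn + mn - k * mn = mn := by omega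
  rw [hdrop]
  have hlen : (List.take mn (List.drop (k * mn) s)).length = min mn (s.length - k * mn) := by
    simp [List.length_take, List.length_drop]
  by_cases hk : k < c
  · have hfit : k * mn + mn ≤ s.length := (hck k).mp hk
    have hlen' : (List.take mn (List.drop (k * mn) s)).length = mn := by omega
    have hne : List.take mn (List.drop (k * mn) s) ≠ [] :=
      List.ne_nil_of_length_pos (by omega)
    rw [if_pos (by simp [PySem.List.len_eq, hlen']), if_pos hk]
    have hpair : (List.take mn (List.drop (k * mn) s)).Pairwise (fun a b => b ≤ a) :=
      List.Pairwise.sublist ((List.take_sublist _ _).trans (List.drop_sublist _ _)) hp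
    rw [pv_min_desc _ hne hpair]
    have hidx : k * mn + (mn - 1) < s.length := by omega
    have hlast : (List.take mn (List.drop (k * mn) s)).getLast hne = s[k * mn + (mn - 1)]'hidx := by
      rw [List.getLast_eq_getElem]
      have h1 : mn - 1 < (List.drop (k * mn) s).length := by simp [List.length_drop]; omega
      rw [List.getElem_take, List.getElem_drop]
      · congr 1
        omega
    have hcast3 : ((mn : Int) - 1) + (mn : Int) * (k : Int) = ((k * mn + (mn - 1) : Nat) : Int) := by
      push_cast [Nat.cast_sub (by omega : 1 ≤ mn)]
      ring
    rw [hlast, hcast3, PySem.List.pyGetD_natCast, List.getD_eq_getElem _ _ hidx]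
  · have hnofit : ¬ (k * mn + mn ≤ s.length) := fun h => hk ((hck k).mpr h)
    rw [if_neg, if_neg hk]
    simp only [beq_iff_eq, PySem.List.len_eq, hlen]
    omega

-- core equivalence on an already-descending list
theorem pv_core (m : Int) (hm : m ≠ 0) (s : List Int) (hp : s.Pairwise (fun a b => b ≤ a)) :
    (PySem.List.pyRange 0 (PySem.List.len s) 1).foldl
      (fun answer i =>
        if PySem.List.len (PySem.List.slice s (some (i*m)) (some (i*m+m))) == m then
          answer + ((PySem.List.min? (PySem.List.slice s (some (i*m)) (some (i*m+m))) (fun x => x)).getD 0) * m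
        else answer) 0
    = m * (PySem.List.pyRange (m - 1) (PySem.List.len s) m).foldl
        (fun acc i => acc + PySem.List.pyGetD s i 0) 0 := by
  rcases lt_or_gt_of_ne hm with hneg | hpos
  · -- m < 0: A's slice-length test never fires, and B's strided range is empty
    have hA : (fun (answer : Int) (i : Int) =>
        if PySem.List.len (PySem.List.slice s (some (i*m)) (some (i*m+m))) == m then
          answer + ((PySem.List.min? (PySem.List.slice s (some (i*m)) (some (i*m+m))) (fun x => x)).getD 0) * m
        else answer) = (fun answer _ => answer) := by
      funext a i
      have : ¬ (PySem.List.len (PySem.List.slice s (some (i*m)) (some (i*m+m))) = m) := by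
        rw [PySem.List.len_eq]; omega
      simp only [beq_iff_eq, if_neg this]
    have hB : PySem.List.pyRange (m - 1) (PySem.List.len s) m = [] := by
      simp only [PySem.List.pyRange, PySem.List.len_eq]
      split_ifs with h1 h2 h3 <;> first | rfl | omega | simp
    rw [hA, hB, pv_foldl_id]
    simp
  · -- m > 0
    lift m to Nat using hpos.le with mn
    have hmn : 0 < mn := by exact_mod_cast hpos
    have hck : ∀ j : Nat, j < (((s.length : Int)) / (mn : Int)).toNat ↔ j * mn + mn ≤ s.length := by
      intro j
      rw [Int.lt_toNat, Int.lt_iff_add_one_le, Int.le_ediv_iff_mul_le hpos, add_one_mul]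
      constructor <;> intro h <;> exact_mod_cast h
    have hcle : (((s.length : Int)) / (mn : Int)).toNat ≤ s.length :=
      Int.toNat_le.mpr (Int.ediv_le_self _ (by positivity))
    -- B side
    rw [PySem.List.pyRange_of_pos _ _ hpos, PySem.List.len_eq]
    have hcnt : (if ((mn : Int) - 1) < (s.length : Int)
          then (((s.length : Int) - ((mn : Int) - 1) + (mn : Int) - 1) / (mn : Int)).toNat else 0)
        = (((s.length : Int)) / (mn : Int)).toNat := by
      split_ifs with h
      · congr 1
        ring_nf
      · rw [Int.ediv_eq_zero_of_lt (by positivity) (by omega)]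
        rfl
    rw [hcnt, List.foldl_map, PySem.List.foldl_add, zero_add]
    -- A side
    rw [PySem.List.pyRange_one, List.foldl_map]
    simp only [zero_add]
    have hbodyA : (fun (a : Int) (k : Nat) =>
        if PySem.List.len (PySem.List.slice s (some ((k : Int) * (mn : Int))) (some ((k : Int) * (mn : Int) + (mn : Int)))) == (mn : Int) then
          a + ((PySem.List.min? (PySem.List.slice s (some ((k : Int) * (mn : Int))) (some ((k : Int) * (mn : Int) + (mn : Int)))) (fun x => x)).getD 0) * (mn : Int)
        else a)
        = (fun (a : Int) (k : Nat) => a + (if PySem.List.len (PySem.List.slice s (some ((k : Int) * (mn : Int))) (some ((k : Int) * (mn : Int) + (mn : Int)))) == (mn : Int) then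
          ((PySem.List.min? (PySem.List.slice s (some ((k : Int) * (mn : Int))) (some ((k : Int) * (mn : Int) + (mn : Int)))) (fun x => x)).getD 0) * (mn : Int)
        else 0)) := by
      funext a k
      split <;> simp
    rw [hbodyA, PySem.List.foldl_add, zero_add]
    rw [List.map_congr_left (fun k _ => pv_termA s hp mn hmn _ hck k)]
    simp only [sub_zero, Int.toNat_natCast]
    rw [pv_sum_ite _ _ _ hcle, List.sum_map_mul_right]
    ring

-- ===== VERDICT (by name: the statement is the Claim_ definition above) =====
theorem solution_spec : Claim_equal_solution := by
  intro k m score _ hpre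
  unfold Spec_solution solution solution_alt
  exact pv_core m hpre _ (PySem.List.sorted_pairwise_rev score (fun x => x))
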